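-- pv_equiv track=rewrite | github.com/elenaborisova/LeetCode-Solutions | greedy/slow_sums.py | get_total_time2
-- ===== SOURCE A (Python) =====
-- import heapq
--
-- def get_total_time2(arr):
--     # using max heap
--     h = [el * -1 for el in arr]
--     heapq.heapify(h)  # n log n
--     total_penalty = 0
--
--     while len(h) > 1:
--         current_sum = heapq.heappop(h) + heapq.heappop(h)
--         total_penalty += current_sum * -1
--         heapq.heappush(h, current_sum)
--
--     return total_penalty
-- ===== SOURCE B (Python) =====
-- def get_total_time2(arr):
--     # Same combine-two-largest process, but on a plain list with repeated
--     # linear max-scans instead of a binary heap.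
--     lst = list(arr)
--     total_penalty = 0
--
--     while len(lst) > 1:
--         m1 = max(lst)
--         lst.remove(m1)
--         m2 = max(lst)
--         lst.remove(m2)
--         current_sum = m1 + m2
--         total_penalty += current_sum
--         lst.append(current_sum)
--
--     return total_penalty
-- ===== Notes on version B (the rewrite author's own statement) =====
-- stated objective: simpler
-- what changed: Replaces the negated max-heap (heapify/heappop/heappush) by a plain list on which each round finds and removes the two maxima with linear max-scans and appends their sum, accumulating the penalty positively instead of negating twice.
import Mathlib
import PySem

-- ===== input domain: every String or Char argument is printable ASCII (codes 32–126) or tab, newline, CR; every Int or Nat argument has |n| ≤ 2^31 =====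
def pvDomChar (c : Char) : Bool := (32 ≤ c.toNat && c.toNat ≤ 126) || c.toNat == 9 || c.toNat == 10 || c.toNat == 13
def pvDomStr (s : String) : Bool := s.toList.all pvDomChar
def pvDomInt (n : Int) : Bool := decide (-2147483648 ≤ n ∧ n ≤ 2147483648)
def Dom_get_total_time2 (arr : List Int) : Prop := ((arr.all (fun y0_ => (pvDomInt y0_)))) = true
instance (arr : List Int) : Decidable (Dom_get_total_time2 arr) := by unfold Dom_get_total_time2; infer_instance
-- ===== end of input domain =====

-- B replaces A's negated max-heap by repeated linear max-scans on a plain list (objective: simpler).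

-- ===== PORT A =====
-- heap[i]; every access below is in range at its call site, so the default 0 is exact there
def pvGetI (l : List Int) (i : Nat) : Int := l.getD i 0

-- heapq._siftdown's while loop; returns (heap, pos) at loop exit
def pvSiftdownLoop (heap : List Int) (startpos pos : Nat) (newitem : Int) : List Int × Nat :=
  if _h : startpos < pos then
    let parentpos := (pos - 1) / 2
    let parent := pvGetI heap parentpos
    if newitem < parent then
      pvSiftdownLoop (heap.set pos parent) startpos parentpos newitem
    else (heap, pos)
  else (heap, pos)
termination_by pos
decreasing_by omega

-- heapq._siftdown(heap, startpos, pos)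
def pvSiftdown (heap : List Int) (startpos pos : Nat) : List Int :=
  let newitem := pvGetI heap pos
  let r := pvSiftdownLoop heap startpos pos newitem
  r.1.set r.2 newitem

-- heapq._siftup's first while loop; returns (heap, pos) at loop exit
def pvSiftupLoop (heap : List Int) (endpos pos childpos : Nat) : List Int × Nat :=
  if _h : childpos < endpos then
    let childpos' := if childpos + 1 < endpos ∧ ¬ pvGetI heap childpos < pvGetI heap (childpos + 1)
      then childpos + 1 else childpos
    pvSiftupLoop (heap.set pos (pvGetI heap childpos')) endpos childpos' (2 * childpos' + 1)
  else (heap, pos)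
termination_by endpos - childpos
decreasing_by split <;> omega

-- heapq._siftup(heap, pos)
def pvSiftup (heap : List Int) (pos : Nat) : List Int :=
  let endpos := heap.length
  let startpos := pos
  let newitem := pvGetI heap pos
  let r := pvSiftupLoop heap endpos pos (2 * pos + 1)
  pvSiftdown (r.1.set r.2 newitem) startpos r.2

-- heapq.heappush
def pvHeappush (heap : List Int) (item : Int) : List Int :=
  let h := heap ++ [item]
  pvSiftdown h 0 (h.length - 1)

-- heapq.heappop; heap is nonempty at both call sites in A (len(h) > 1), where this is exact
def pvHeappop (heap : List Int) : Int × List Int :=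
  let lastelt := pvGetI heap (heap.length - 1)
  let rest := heap.dropLast
  if rest.length ≠ 0 then
    let returnitem := pvGetI rest 0
    (returnitem, pvSiftup (rest.set 0 lastelt) 0)
  else (lastelt, rest)

-- heapq.heapify: for i in reversed(range(n//2)): _siftup(x, i)
def pvHeapify (x : List Int) : List Int :=
  (List.range (x.length / 2)).reverse.foldl (fun h i => pvSiftup h i) x

-- A's while loop; fuel only makes the recursion structural (each round shrinks the heap
-- by one, so the initial fuel arr.length is never exhausted before len(h) ≤ 1)
def pvLoopA (fuel : Nat) (h : List Int) (total_penalty : Int) : Int :=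
  match fuel with
  | 0 => total_penalty
  | fuel + 1 =>
    if 1 < h.length then
      let p1 := pvHeappop h
      let p2 := pvHeappop p1.2
      let current_sum := p1.1 + p2.1
      pvLoopA fuel (pvHeappush p2.2 current_sum) (total_penalty + current_sum * (-1))
    else total_penalty

def get_total_time2 (arr : List Int) : Int :=
  let h := pvHeapify (arr.map (fun el => el * (-1)))
  pvLoopA arr.length h 0

-- ===== PORT B =====
-- B's while loop; fuel only makes the recursion structural (each round shrinks the list
-- by one, so the initial fuel arr.length is never exhausted before len(lst) ≤ 1).
-- max(lst) and lst.remove(m) always succeed at their call sites (len(lst) > 1), where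
-- the .getD defaults are exact.
def pvLoopB (fuel : Nat) (lst : List Int) (total_penalty : Int) : Int :=
  match fuel with
  | 0 => total_penalty
  | fuel + 1 =>
    if 1 < lst.length then
      let m1 := (PySem.List.max? lst (fun y => y)).getD 0
      let lst1 := (PySem.List.remove? lst m1).getD lst
      let m2 := (PySem.List.max? lst1 (fun y => y)).getD 0
      let lst2 := (PySem.List.remove? lst1 m2).getD lst1
      let current_sum := m1 + m2
      pvLoopB fuel (lst2 ++ [current_sum]) (total_penalty + current_sum)
    else total_penalty

def get_total_time2_alt (arr : List Int) : Int := pvLoopB arr.length arr 0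

-- ===== PRECONDITION & SPEC =====
def Spec_get_total_time2 (arr : List Int) (out : Int) : Prop := out = get_total_time2_alt arr
instance (arr : List Int) (out : Int) : Decidable (Spec_get_total_time2 arr out) := by unfold Spec_get_total_time2; infer_instance

-- ===== CLAIM (what is proved, stated in full; the proofs are below) =====
def Claim_equal_get_total_time2 : Prop := ∀ (arr : List Int), Dom_get_total_time2 arr → Spec_get_total_time2 arr (get_total_time2 arr)

-- ===== LEMMAS AND PROOFS =====

-- i sits in the subtree rooted at r of the implicit heap shape (parent of j is (j-1)/2)
def pvDesc (r i : Nat) : Bool :=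
  if i ≤ r then r == i else pvDesc r ((i - 1) / 2)
termination_by i
decreasing_by omega

-- the heap invariant on every parent edge whose parent index is ≥ m
def HeapAbove (l : List Int) (m : Nat) : Prop :=
  ∀ j, j < l.length → 1 ≤ j → m ≤ (j - 1) / 2 → pvGetI l ((j - 1) / 2) ≤ pvGetI l j

def IsHeap (l : List Int) : Prop := HeapAbove l 0

-- basic facts about pvGetI / List.set
lemma pvGetI_set_self {l : List Int} {i : Nat} (v : Int) (h : i < l.length) :
    pvGetI (l.set i v) i = v := by
  simp [pvGetI, List.getD_eq_getElem?_getD, h]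

lemma pvGetI_set_ne {l : List Int} {i j : Nat} (v : Int) (h : i ≠ j) :
    pvGetI (l.set i v) j = pvGetI l j := by
  simp [pvGetI, List.getD_eq_getElem?_getD, List.getElem?_set_ne h]

lemma pvGetI_eq_getElem {l : List Int} {i : Nat} (h : i < l.length) : pvGetI l i = l[i] :=
  List.getD_eq_getElem l 0 h

lemma pvSet_getI_self {l : List Int} {i : Nat} (h : i < l.length) : l.set i (pvGetI l i) = l := by
  rw [pvGetI_eq_getElem h]; exact List.set_getElem_self h

lemma perm_getI_cons_set (t : List Int) (j : Nat) (v : Int) (h : j < t.length) :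
    (pvGetI t j :: t.set j v).Perm (v :: t) := by
  induction t generalizing j with
  | nil => simp at h
  | cons a s ih =>
    cases j with
    | zero => simpa [pvGetI] using List.Perm.swap v a s
    | succ k =>
      have hk : k < s.length := by simpa using h
      have h1 : (pvGetI (a :: s) (k+1) :: (a :: s).set (k+1) v)
          = pvGetI s k :: a :: s.set k v := by simp [pvGetI]
      rw [h1]
      exact ((List.Perm.swap a (pvGetI s k) _).trans ((ih k hk).cons a)).trans
        (List.Perm.swap v a s)

lemma perm_set_comm (t : List Int) (k : Nat) (a b : Int) (h : k < t.length) :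
    (a :: t.set k b).Perm (b :: t.set k a) := by
  have h' : k < (t.set k a).length := by simpa using h
  have := perm_getI_cons_set (t.set k a) k b h'
  rwa [pvGetI_set_self a h, List.set_set] at this

lemma perm_set_set (l : List Int) (i j : Nat) (x : Int) (hi : i < l.length) (hj : j < l.length)
    (hij : i ≠ j) : ((l.set i (pvGetI l j)).set j x).Perm (l.set i x) := by
  induction l generalizing i j with
  | nil => simp at hi
  | cons a t ih =>
    cases i with
    | zero =>
      cases j with
      | zero => omega
      | succ k =>
        have hk : k < t.length := by simpa using hj
        simpa [pvGetI] using perm_getI_cons_set t k x hk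
    | succ i' =>
      cases j with
      | zero =>
        have hi' : i' < t.length := by simpa using hi
        simpa [pvGetI] using perm_set_comm t i' x a hi'
      | succ j' =>
        have hi' : i' < t.length := by simpa using hi
        have hj' : j' < t.length := by simpa using hj
        have hij' : i' ≠ j' := by omega
        simpa [pvGetI] using (ih i' j' hi' hj' hij').cons a

-- facts about pvDesc
lemma pvDesc_refl (r : Nat) : pvDesc r r = true := by rw [pvDesc]; simp

lemma pvDesc_le {r i : Nat} (h : pvDesc r i = true) : r ≤ i := by
  rw [pvDesc] at h
  split at h
  · simp only [beq_iff_eq] at h; omega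
  · next hn => omega

lemma pvDesc_par {r i : Nat} (h : pvDesc r i = true) (hne : i ≠ r) :
    pvDesc r ((i - 1) / 2) = true := by
  rw [pvDesc] at h
  split at h
  · simp only [beq_iff_eq] at h; exact absurd h.symm hne
  · exact h

lemma pvDesc_child (c : Nat) : pvDesc ((c - 1) / 2) c = true := by
  rw [pvDesc]
  split
  · next hle =>
    have : c = 0 := by omega
    subst this; simp
  · exact pvDesc_refl _

lemma pvDesc_trans : ∀ {q p m : Nat}, pvDesc p m = true → pvDesc m q = true → pvDesc p q = true := by
  intro q
  induction q using Nat.strong_induction_on with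
  | _ q ih =>
    intro p m h1 h2
    by_cases hqm : q = m
    · subst hqm; exact h1
    · have hmq : m ≤ q := pvDesc_le h2
      have hq1 : 1 ≤ q := by omega
      have h2' : pvDesc m ((q - 1) / 2) = true := pvDesc_par h2 hqm
      have hp : pvDesc p ((q - 1) / 2) = true := ih ((q - 1) / 2) (by omega) h1 h2'
      have hpq : p < q := by
        have := pvDesc_le h1
        omega
      rw [pvDesc, if_neg (by omega : ¬ q ≤ p)]
      exact hp

lemma pvDesc_zero : ∀ (i : Nat), pvDesc 0 i = true := by
  intro i
  induction i using Nat.strong_induction_on with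
  | _ i ih =>
    rcases Nat.eq_zero_or_pos i with h0 | h0
    · subst h0; rw [pvDesc]; simp
    · rw [pvDesc, if_neg (by omega : ¬ i ≤ 0)]
      exact ih _ (by omega)

lemma pvDesc_succ_self (m : Nat) (h : 1 ≤ m) : pvDesc m (m + 1) = false := by
  rw [pvDesc, if_neg (by omega : ¬ m + 1 ≤ m)]
  have he : (m + 1 - 1) / 2 = m / 2 := by omega
  rw [he]
  cases hb : pvDesc m (m / 2)
  · rfl
  · have := pvDesc_le hb; omega

lemma pvDesc_false_of_lt {r i : Nat} (h : i < r) : pvDesc r i = false := by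
  cases hb : pvDesc r i
  · rfl
  · have := pvDesc_le hb; omega

-- master invariant lemma for heapq._siftdown's while loop
lemma sdl_master : ∀ (p : Nat) (l : List Int) (s : Nat) (x : Int),
    p < l.length → pvDesc s p = true →
    (∀ j, j < l.length → 1 ≤ j → s ≤ (j - 1) / 2 → j ≠ p →
      pvGetI (l.set p x) ((j - 1) / 2) ≤ pvGetI (l.set p x) j) →
    (s < p → ∀ j, j < l.length → (j - 1) / 2 = p →
      pvGetI (l.set p x) ((p - 1) / 2) ≤ pvGetI (l.set p x) j) →
    (pvSiftdownLoop l s p x).1.length = l.length ∧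
    (pvSiftdownLoop l s p x).2 < l.length ∧
    ((pvSiftdownLoop l s p x).1.set (pvSiftdownLoop l s p x).2 x).Perm (l.set p x) ∧
    (∀ j, j < l.length → 1 ≤ j → s ≤ (j - 1) / 2 →
      pvGetI ((pvSiftdownLoop l s p x).1.set (pvSiftdownLoop l s p x).2 x) ((j - 1) / 2) ≤
      pvGetI ((pvSiftdownLoop l s p x).1.set (pvSiftdownLoop l s p x).2 x) j) := by
  intro p
  induction p using Nat.strong_induction_on with
  | _ p ih =>
    intro l s x hp hdesc J1 J2
    by_cases hsp : s < p
    · by_cases hlt : x < pvGetI l ((p - 1) / 2)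
      · -- loop body runs: hole moves to the parent
        have hstep : pvSiftdownLoop l s p x
            = pvSiftdownLoop (l.set p (pvGetI l ((p - 1) / 2))) s ((p - 1) / 2) x := by
          rw [pvSiftdownLoop]; simp [hsp, hlt]
        have hppp : (p - 1) / 2 < p := by omega
        have hpplen : (p - 1) / 2 < l.length := by omega
        have hppne : (p - 1) / 2 ≠ p := by omega
        have hdesc' : pvDesc s ((p - 1) / 2) = true := pvDesc_par hdesc (by omega)
        -- values of v' := (l.set p parent).set ((p-1)/2) x
        have hlen' : (l.set p (pvGetI l ((p - 1) / 2))).length = l.length := by simp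
        have hv'pp : pvGetI ((l.set p (pvGetI l ((p - 1) / 2))).set ((p - 1) / 2) x)
            ((p - 1) / 2) = x := pvGetI_set_self x (by omega)
        have hv'p : pvGetI ((l.set p (pvGetI l ((p - 1) / 2))).set ((p - 1) / 2) x) p
            = pvGetI l ((p - 1) / 2) := by
          rw [pvGetI_set_ne x hppne, pvGetI_set_self _ hp]
        have hv'other : ∀ k, k ≠ p → k ≠ (p - 1) / 2 →
            pvGetI ((l.set p (pvGetI l ((p - 1) / 2))).set ((p - 1) / 2) x) k = pvGetI l k := by
          intro k hk1 hk2
          rw [pvGetI_set_ne x (fun h => hk2 h.symm), pvGetI_set_ne _ (fun h => hk1 h.symm)]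
        have hvp : pvGetI (l.set p x) p = x := pvGetI_set_self x hp
        have hvother : ∀ k, k ≠ p → pvGetI (l.set p x) k = pvGetI l k := by
          intro k hk; exact pvGetI_set_ne x (fun h => hk h.symm)
        -- J1 for the recursive call
        have J1' : ∀ j, j < (l.set p (pvGetI l ((p - 1) / 2))).length → 1 ≤ j →
            s ≤ (j - 1) / 2 → j ≠ (p - 1) / 2 →
            pvGetI ((l.set p (pvGetI l ((p - 1) / 2))).set ((p - 1) / 2) x) ((j - 1) / 2) ≤
            pvGetI ((l.set p (pvGetI l ((p - 1) / 2))).set ((p - 1) / 2) x) j := by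
          intro j hj hj1 hjs hjne
          rw [hlen'] at hj
          by_cases hjp : j = p
          · subst hjp
            rw [hv'pp, hv'p]
            exact le_of_lt hlt
          · by_cases hpar : (j - 1) / 2 = (p - 1) / 2
            · have h1 := J1 j hj hj1 hjs hjp
              rw [hpar, hvother _ hppne, hvother _ hjp] at h1
              rw [hpar, hv'pp, hv'other j hjp hjne]
              exact le_trans (le_of_lt hlt) h1
            · by_cases hparp : (j - 1) / 2 = p
              · rw [hparp, hv'p, hv'other j hjp hjne]
                have h2 := J2 hsp j hj hparp
                rw [hvother _ hppne, hvother _ hjp] at h2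
                exact h2
              · rw [hv'other _ hparp hpar, hv'other j hjp hjne]
                have h1 := J1 j hj hj1 hjs hjp
                rw [hvother _ hparp, hvother _ hjp] at h1
                exact h1
        -- J2 for the recursive call
        have J2' : s < (p - 1) / 2 → ∀ j, j < (l.set p (pvGetI l ((p - 1) / 2))).length →
            (j - 1) / 2 = (p - 1) / 2 →
            pvGetI ((l.set p (pvGetI l ((p - 1) / 2))).set ((p - 1) / 2) x) (((p - 1) / 2 - 1) / 2) ≤
            pvGetI ((l.set p (pvGetI l ((p - 1) / 2))).set ((p - 1) / 2) x) j := by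
          intro hspp j hj hjpar
          rw [hlen'] at hj
          have hpp1 : 1 ≤ (p - 1) / 2 := by omega
          have hdesc'' : pvDesc s (((p - 1) / 2 - 1) / 2) = true :=
            pvDesc_par hdesc' (by omega)
          have hsppp : s ≤ ((p - 1) / 2 - 1) / 2 := pvDesc_le hdesc''
          have hpppp : ((p - 1) / 2 - 1) / 2 < (p - 1) / 2 := by omega
          have hpppne : ((p - 1) / 2 - 1) / 2 ≠ p := by omega
          have hpppne2 : ((p - 1) / 2 - 1) / 2 ≠ (p - 1) / 2 := by omega
          -- base: l ppp ≤ l pp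
          have hbase := J1 ((p - 1) / 2) hpplen hpp1 hsppp hppne
          rw [hvother _ hpppne, hvother _ hppne] at hbase
          rw [hv'other _ hpppne hpppne2]
          by_cases hjp : j = p
          · subst hjp; rw [hv'p]; exact hbase
          · have hjpp : j ≠ (p - 1) / 2 := by omega
            rw [hv'other j hjp hjpp]
            have h1 := J1 j hj (by omega) (by omega) hjp
            rw [hjpar, hvother _ hppne, hvother _ hjp] at h1
            exact le_trans hbase h1
        obtain ⟨c1, c2, c3, c4⟩ := ih ((p - 1) / 2) hppp (l.set p (pvGetI l ((p - 1) / 2))) s x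
          (by omega) hdesc' J1' J2'
        rw [hlen'] at c1 c2
        refine ⟨by rw [hstep]; exact c1, by rw [hstep]; exact c2, ?_, ?_⟩
        · rw [hstep]
          refine c3.trans ?_
          have hperm := perm_set_set (l.set p x) p ((p - 1) / 2) x (by simpa using hp)
            (by simpa using hpplen) (by omega)
          rw [List.set_set, List.set_set, pvGetI_set_ne x (fun h => hppne h.symm)] at hperm
          exact hperm
        · intro j hj hj1 hjs
          rw [hstep]
          exact c4 j (by simpa [hlen'] using hj) hj1 hjs
      · -- exit: newitem ≥ parent
        have hstep : pvSiftdownLoop l s p x = (l, p) := by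
          rw [pvSiftdownLoop]; simp [hsp, hlt]
        rw [hstep]
        refine ⟨rfl, hp, List.Perm.refl _, ?_⟩
        intro j hj hj1 hjs
        by_cases hjp : j = p
        · subst hjp
          have hppne : (j - 1) / 2 ≠ j := by omega
          rw [pvGetI_set_self x hp, pvGetI_set_ne x (fun h => hppne h.symm)]
          exact le_of_not_gt (by simpa using hlt)
        · exact J1 j hj hj1 hjs hjp
    · -- exit: pos = startpos
      have hps : p = s := by have := pvDesc_le hdesc; omega
      have hstep : pvSiftdownLoop l s p x = (l, p) := by
        rw [pvSiftdownLoop]; simp [hsp]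
      rw [hstep]
      refine ⟨rfl, hp, List.Perm.refl _, ?_⟩
      intro j hj hj1 hjs
      have hjp : j ≠ p := by omega
      exact J1 j hj hj1 hjs hjp

-- heapq._siftdown establishes the heap property on all parent edges with parent ≥ startpos
lemma sd_spec (l : List Int) (s p : Nat) (hp : p < l.length) (hdesc : pvDesc s p = true)
    (J1 : ∀ j, j < l.length → 1 ≤ j → s ≤ (j - 1) / 2 → j ≠ p →
      pvGetI l ((j - 1) / 2) ≤ pvGetI l j)
    (J2 : s < p → ∀ j, j < l.length → (j - 1) / 2 = p →
      pvGetI l ((p - 1) / 2) ≤ pvGetI l j) :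
    (pvSiftdown l s p).length = l.length ∧ (pvSiftdown l s p).Perm l ∧
    (∀ j, j < l.length → 1 ≤ j → s ≤ (j - 1) / 2 →
      pvGetI (pvSiftdown l s p) ((j - 1) / 2) ≤ pvGetI (pvSiftdown l s p) j) := by
  have hsetl : l.set p (pvGetI l p) = l := pvSet_getI_self hp
  obtain ⟨c1, c2, c3, c4⟩ := sdl_master p l s (pvGetI l p) hp hdesc
    (by rw [hsetl]; exact J1) (by rw [hsetl]; exact J2)
  rw [hsetl] at c3
  simp only [pvSiftdown]
  exact ⟨by simp [c1], c3, c4⟩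

-- master invariant lemma for heapq._siftup's first while loop (sift to a leaf)
lemma sul_master : ∀ (d : Nat) (l : List Int) (p : Nat),
    l.length - (2 * p + 1) ≤ d → p < l.length →
    (∀ j, j < l.length → 1 ≤ j → p < (j - 1) / 2 → pvGetI l ((j - 1) / 2) ≤ pvGetI l j) →
    (pvSiftupLoop l l.length p (2 * p + 1)).1.length = l.length ∧
    (pvSiftupLoop l l.length p (2 * p + 1)).2 < l.length ∧
    pvDesc p (pvSiftupLoop l l.length p (2 * p + 1)).2 = true ∧
    l.length ≤ 2 * (pvSiftupLoop l l.length p (2 * p + 1)).2 + 1 ∧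
    (∀ x : Int, ((pvSiftupLoop l l.length p (2 * p + 1)).1.set
        (pvSiftupLoop l l.length p (2 * p + 1)).2 x).Perm (l.set p x)) ∧
    (∀ j, j < l.length → 1 ≤ j → p ≤ (j - 1) / 2 →
      pvGetI (pvSiftupLoop l l.length p (2 * p + 1)).1 ((j - 1) / 2) ≤
      pvGetI (pvSiftupLoop l l.length p (2 * p + 1)).1 j) ∧
    (∀ j, j < l.length → pvDesc p j = false →
      pvGetI (pvSiftupLoop l l.length p (2 * p + 1)).1 j = pvGetI l j) ∧
    (pvGetI (pvSiftupLoop l l.length p (2 * p + 1)).1 p = pvGetI l p ∨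
      ∃ c, c < l.length ∧ (c - 1) / 2 = p ∧
        pvGetI (pvSiftupLoop l l.length p (2 * p + 1)).1 p = pvGetI l c) := by
  have exit : ∀ (l : List Int) (p : Nat), ¬ (2 * p + 1 < l.length) → p < l.length →
      (∀ j, j < l.length → 1 ≤ j → p < (j - 1) / 2 → pvGetI l ((j - 1) / 2) ≤ pvGetI l j) →
      (pvSiftupLoop l l.length p (2 * p + 1)).1.length = l.length ∧
      (pvSiftupLoop l l.length p (2 * p + 1)).2 < l.length ∧
      pvDesc p (pvSiftupLoop l l.length p (2 * p + 1)).2 = true ∧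
      l.length ≤ 2 * (pvSiftupLoop l l.length p (2 * p + 1)).2 + 1 ∧
      (∀ x : Int, ((pvSiftupLoop l l.length p (2 * p + 1)).1.set
          (pvSiftupLoop l l.length p (2 * p + 1)).2 x).Perm (l.set p x)) ∧
      (∀ j, j < l.length → 1 ≤ j → p ≤ (j - 1) / 2 →
        pvGetI (pvSiftupLoop l l.length p (2 * p + 1)).1 ((j - 1) / 2) ≤
        pvGetI (pvSiftupLoop l l.length p (2 * p + 1)).1 j) ∧
      (∀ j, j < l.length → pvDesc p j = false →
        pvGetI (pvSiftupLoop l l.length p (2 * p + 1)).1 j = pvGetI l j) ∧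
      (pvGetI (pvSiftupLoop l l.length p (2 * p + 1)).1 p = pvGetI l p ∨
        ∃ c, c < l.length ∧ (c - 1) / 2 = p ∧
          pvGetI (pvSiftupLoop l l.length p (2 * p + 1)).1 p = pvGetI l c) := by
    intro l p hc hp pre
    have hstep : pvSiftupLoop l l.length p (2 * p + 1) = (l, p) := by
      rw [pvSiftupLoop]; simp [hc]
    rw [hstep]
    refine ⟨rfl, hp, pvDesc_refl p, by omega, fun x => List.Perm.refl _, ?_, fun j _ _ => rfl,
      Or.inl rfl⟩
    intro j hj hj1 hjp
    by_cases hpar : (j - 1) / 2 = p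
    · omega
    · exact pre j hj hj1 (by omega)
  intro d
  induction d with
  | zero =>
    intro l p hd hp pre
    exact exit l p (by omega) hp pre
  | succ d ihd =>
    intro l p hd hp pre
    by_cases hc : 2 * p + 1 < l.length
    · -- one promotion step: the hole moves to the smaller child m
      obtain ⟨m, hstep, hmlow, hmhigh2, hmlen, hmin⟩ :
          ∃ m, pvSiftupLoop l l.length p (2 * p + 1)
              = pvSiftupLoop (l.set p (pvGetI l m)) l.length m (2 * m + 1)
            ∧ 2 * p + 1 ≤ m ∧ m ≤ 2 * p + 2 ∧ m < l.length
            ∧ (∀ j, j < l.length → 1 ≤ j → (j - 1) / 2 = p → pvGetI l m ≤ pvGetI l j) := by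
        by_cases hcond : 2 * p + 1 + 1 < l.length ∧
            pvGetI l (2 * p + 1 + 1) ≤ pvGetI l (2 * p + 1)
        · refine ⟨2 * p + 1 + 1, by rw [pvSiftupLoop]; simp [hc, hcond], by omega, by omega,
            hcond.1, ?_⟩
          intro j hj hj1 hjpar
          rcases (by omega : j = 2 * p + 1 ∨ j = 2 * p + 2) with h | h <;> subst h
          · exact hcond.2
          · exact le_refl _
        · refine ⟨2 * p + 1, by rw [pvSiftupLoop]; simp [hc, hcond], by omega, by omega,
            hc, ?_⟩
          intro j hj hj1 hjpar
          push Not at hcond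
          rcases (by omega : j = 2 * p + 1 ∨ j = 2 * p + 2) with h | h <;> subst h
          · exact le_refl _
          · exact le_of_lt (hcond (by omega))
      have hpm : p < m := by omega
      have hmp : (m - 1) / 2 = p := by omega
      have hdm : pvDesc p m = true := by have := pvDesc_child m; rwa [hmp] at this
      have hlen' : (l.set p (pvGetI l m)).length = l.length := by simp
      have pre' : ∀ j, j < (l.set p (pvGetI l m)).length → 1 ≤ j → m < (j - 1) / 2 →
          pvGetI (l.set p (pvGetI l m)) ((j - 1) / 2) ≤ pvGetI (l.set p (pvGetI l m)) j := by
        intro j hj hj1 hjm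
        rw [hlen'] at hj
        rw [pvGetI_set_ne _ (by omega : p ≠ (j - 1) / 2), pvGetI_set_ne _ (by omega : p ≠ j)]
        exact pre j hj hj1 (by omega)
      obtain ⟨c1, c2, c3, c4, c5, c6, c7, c8⟩ :=
        ihd (l.set p (pvGetI l m)) m (by omega) (by omega) pre'
      rw [hlen'] at c1 c2 c3 c4 c5 c6 c7 c8
      -- the hole position p itself holds the promoted child value
      have hSp : pvGetI (pvSiftupLoop (l.set p (pvGetI l m)) l.length m (2 * m + 1)).1 p
          = pvGetI l m := by
        rw [c7 p hp (pvDesc_false_of_lt hpm), pvGetI_set_self _ hp]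
      rw [hstep]
      refine ⟨c1, c2, pvDesc_trans hdm c3, c4, ?_, ?_, ?_, ?_⟩
      · intro x
        exact (c5 x).trans (perm_set_set l p m x hp hmlen (by omega))
      · -- heap property on all edges with parent ≥ p
        intro j hj hj1 hjp'
        by_cases hmj : m ≤ (j - 1) / 2
        · exact c6 j hj hj1 hmj
        · by_cases hjparp : (j - 1) / 2 = p
          · rw [hjparp, hSp]
            by_cases hjm : j = m
            · subst hjm
              rcases c8 with c8l | ⟨c, hclen, hcpar, hceq⟩
              · rw [c8l, pvGetI_set_ne _ (by omega : p ≠ j)]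
              · rw [hceq, pvGetI_set_ne _ (by omega : p ≠ c)]
                have hpc := pre c hclen (by omega) (by omega)
                rwa [hcpar] at hpc
            · have hdmj : pvDesc m j = false := by
                rcases (by omega : j < m ∨ j = m + 1) with h | h
                · exact pvDesc_false_of_lt h
                · rw [h]; exact pvDesc_succ_self m (by omega)
              rw [c7 j hj hdmj, pvGetI_set_ne _ (by omega : p ≠ j)]
              exact hmin j hj hj1 hjparp
          · have hjm0 : j ≠ m := by
              intro h; subst h; exact hjparp hmp
            have hdmj : pvDesc m j = false := by
              cases hb : pvDesc m j
              · rfl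
              · exact absurd (pvDesc_le (pvDesc_par hb hjm0)) (by omega)
            have hdmpj : pvDesc m ((j - 1) / 2) = false := pvDesc_false_of_lt (by omega)
            rw [c7 j hj hdmj, c7 ((j - 1) / 2) (by omega) hdmpj,
              pvGetI_set_ne _ (by omega : p ≠ j), pvGetI_set_ne _ (by omega : p ≠ (j - 1) / 2)]
            exact pre j hj hj1 (by omega)
      · -- positions outside the subtree of p are untouched
        intro j hj hdpj
        have hjm0 : j ≠ p := by
          intro h; subst h; rw [pvDesc_refl] at hdpj; exact Bool.noConfusion hdpj
        have hdmj : pvDesc m j = false := by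
          cases hb : pvDesc m j
          · rfl
          · rw [pvDesc_trans hdm hb] at hdpj; exact Bool.noConfusion hdpj
        rw [c7 j hj hdmj, pvGetI_set_ne _ (fun h => hjm0 h.symm)]
      · exact Or.inr ⟨m, hmlen, hmp, hSp⟩
    · exact exit l p hc hp pre

-- heapq._siftup restores the heap property on all parent edges with parent ≥ pos
lemma su_spec (l : List Int) (p : Nat) (hp : p < l.length)
    (pre : ∀ j, j < l.length → 1 ≤ j → p < (j - 1) / 2 → pvGetI l ((j - 1) / 2) ≤ pvGetI l j) :
    (pvSiftup l p).length = l.length ∧ (pvSiftup l p).Perm l ∧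
    (∀ j, j < l.length → 1 ≤ j → p ≤ (j - 1) / 2 →
      pvGetI (pvSiftup l p) ((j - 1) / 2) ≤ pvGetI (pvSiftup l p) j) := by
  obtain ⟨c1, c2, c3, c4, c5, c6, c7, c8⟩ :=
    sul_master (l.length - (2 * p + 1)) l p (le_refl _) hp pre
  have hq2 : (pvSiftupLoop l l.length p (2 * p + 1)).2 <
      ((pvSiftupLoop l l.length p (2 * p + 1)).1.set
        (pvSiftupLoop l l.length p (2 * p + 1)).2 (pvGetI l p)).length := by
    simp [c1, c2]
  have J1 : ∀ j, j < ((pvSiftupLoop l l.length p (2 * p + 1)).1.set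
      (pvSiftupLoop l l.length p (2 * p + 1)).2 (pvGetI l p)).length → 1 ≤ j →
      p ≤ (j - 1) / 2 → j ≠ (pvSiftupLoop l l.length p (2 * p + 1)).2 →
      pvGetI ((pvSiftupLoop l l.length p (2 * p + 1)).1.set
        (pvSiftupLoop l l.length p (2 * p + 1)).2 (pvGetI l p)) ((j - 1) / 2) ≤
      pvGetI ((pvSiftupLoop l l.length p (2 * p + 1)).1.set
        (pvSiftupLoop l l.length p (2 * p + 1)).2 (pvGetI l p)) j := by
    intro j hj hj1 hjs hjq
    have hj' : j < l.length := by simpa [c1] using hj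
    have hparq : (j - 1) / 2 ≠ (pvSiftupLoop l l.length p (2 * p + 1)).2 := by omega
    rw [pvGetI_set_ne _ (fun hh => hparq hh.symm), pvGetI_set_ne _ (fun hh => hjq hh.symm)]
    exact c6 j hj' hj1 hjs
  have J2 : p < (pvSiftupLoop l l.length p (2 * p + 1)).2 →
      ∀ j, j < ((pvSiftupLoop l l.length p (2 * p + 1)).1.set
        (pvSiftupLoop l l.length p (2 * p + 1)).2 (pvGetI l p)).length →
      (j - 1) / 2 = (pvSiftupLoop l l.length p (2 * p + 1)).2 →
      pvGetI ((pvSiftupLoop l l.length p (2 * p + 1)).1.set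
        (pvSiftupLoop l l.length p (2 * p + 1)).2 (pvGetI l p))
        (((pvSiftupLoop l l.length p (2 * p + 1)).2 - 1) / 2) ≤
      pvGetI ((pvSiftupLoop l l.length p (2 * p + 1)).1.set
        (pvSiftupLoop l l.length p (2 * p + 1)).2 (pvGetI l p)) j := by
    intro hpq j hj hjpar
    have hj' : j < l.length := by simpa [c1] using hj
    omega
  obtain ⟨d1, d2, d3⟩ := sd_spec
    ((pvSiftupLoop l l.length p (2 * p + 1)).1.set
      (pvSiftupLoop l l.length p (2 * p + 1)).2 (pvGetI l p))
    p (pvSiftupLoop l l.length p (2 * p + 1)).2 hq2 c3 J1 J2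
  refine ⟨?_, ?_, ?_⟩
  · simp only [pvSiftup]; rw [d1]; simp [c1]
  · simp only [pvSiftup]
    refine d2.trans ?_
    have := c5 (pvGetI l p)
    rw [pvSet_getI_self hp] at this
    exact this
  · intro j hj hj1 hjs
    simp only [pvSiftup]
    exact d3 j (by simp [c1]; omega) hj1 hjs

-- heapify's fold over reversed(range(n//2))
lemma heapify_fold : ∀ (k : Nat) (l : List Int), k ≤ l.length / 2 →
    (∀ j, j < l.length → 1 ≤ j → k ≤ (j - 1) / 2 → pvGetI l ((j - 1) / 2) ≤ pvGetI l j) →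
    ((List.range k).reverse.foldl (fun h i => pvSiftup h i) l).length = l.length ∧
    ((List.range k).reverse.foldl (fun h i => pvSiftup h i) l).Perm l ∧
    IsHeap ((List.range k).reverse.foldl (fun h i => pvSiftup h i) l) := by
  intro k
  induction k with
  | zero =>
    intro l _ pre
    exact ⟨rfl, List.Perm.refl _, fun j hj hj1 _ => pre j hj hj1 (by omega)⟩
  | succ k ihk =>
    intro l hk pre
    have hrange : (List.range (k + 1)).reverse = k :: (List.range k).reverse := by
      simp [List.range_succ]
    rw [hrange, List.foldl_cons]
    have hklen : k < l.length := by omega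
    obtain ⟨s1, s2, s3⟩ := su_spec l k hklen (fun j hj hj1 hjk => pre j hj hj1 (by omega))
    obtain ⟨f1, f2, f3⟩ := ihk (pvSiftup l k) (by rw [s1]; omega)
      (fun j hj hj1 hjk => s3 j (by rwa [s1] at hj) hj1 hjk)
    exact ⟨f1.trans s1, f2.trans s2, f3⟩

lemma heapify_spec (x : List Int) :
    (pvHeapify x).length = x.length ∧ (pvHeapify x).Perm x ∧ IsHeap (pvHeapify x) := by
  have := heapify_fold (x.length / 2) x (le_refl _)
    (fun j hj hj1 hjk => absurd hjk (by omega))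
  simpa [pvHeapify] using this

-- in a heap the root is a lower bound
lemma root_min (l : List Int) (hl : IsHeap l) : ∀ j, j < l.length → pvGetI l 0 ≤ pvGetI l j := by
  intro j
  induction j using Nat.strong_induction_on with
  | _ j ih =>
    intro hj
    rcases Nat.eq_zero_or_pos j with h0 | h0
    · subst h0; exact le_refl _
    · exact le_trans (ih ((j - 1) / 2) (by omega) (by omega)) (hl j hj h0 (by omega))

lemma root_min_mem (l : List Int) (hl : IsHeap l) : ∀ y ∈ l, pvGetI l 0 ≤ y := by
  intro y hy
  obtain ⟨j, hj, rfl⟩ := List.mem_iff_getElem.mp hy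
  rw [← pvGetI_eq_getElem hj]
  exact root_min l hl j hj

lemma pvGetI_dropLast {l : List Int} {i : Nat} (h : i < l.dropLast.length) :
    pvGetI l.dropLast i = pvGetI l i := by
  rw [pvGetI_eq_getElem h, pvGetI_eq_getElem (by simp at h ⊢; omega)]
  exact List.getElem_dropLast h

lemma pvGetI_append_left {l : List Int} (t : List Int) {i : Nat} (h : i < l.length) :
    pvGetI (l ++ t) i = pvGetI l i := by
  rw [pvGetI_eq_getElem (by simp; omega), pvGetI_eq_getElem h]
  exact List.getElem_append_left h

-- heapq.heappop on a nonempty heap: returns the root (a minimum), leaves a heap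
lemma pop_spec (l : List Int) (hl : IsHeap l) (hne : l ≠ []) :
    (pvHeappop l).2.length = l.length - 1 ∧
    ((pvHeappop l).1 :: (pvHeappop l).2).Perm l ∧
    IsHeap (pvHeappop l).2 ∧
    (∀ y ∈ l, (pvHeappop l).1 ≤ y) := by
  obtain ⟨a, t, rfl⟩ : ∃ a t, l = a :: t := by
    cases l with
    | nil => exact absurd rfl hne
    | cons a t => exact ⟨a, t, rfl⟩
  by_cases ht : t = []
  · subst ht
    have heq : pvHeappop [a] = (a, []) := by simp [pvHeappop, pvGetI]
    rw [heq]
    refine ⟨rfl, List.Perm.refl _, ?_, ?_⟩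
    · intro j hj; simp at hj
    · intro y hy; simp at hy; omega
  · have hrest : (a :: t).dropLast = a :: t.dropLast := List.dropLast_cons_of_ne_nil ht
    have hrlen : (a :: t).dropLast.length ≠ 0 := by
      rw [hrest]; simp
    have hget0 : pvGetI (a :: t).dropLast 0 = a := by rw [hrest]; rfl
    have heq : pvHeappop (a :: t) = (a,
        pvSiftup ((a :: t).dropLast.set 0 (pvGetI (a :: t) ((a :: t).length - 1))) 0) := by
      rw [pvHeappop]
      simp only [hrlen, if_pos, ne_eq, not_false_eq_true, hget0]
    have hlast : pvGetI (a :: t) ((a :: t).length - 1) = t.getLast ht := by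
      obtain ⟨k, hk⟩ : ∃ k, t.length = k + 1 :=
        ⟨t.length - 1, by cases t with | nil => exact absurd rfl ht | cons b u => simp⟩
      have h1 : (a :: t).length - 1 = k + 1 := by simp [hk]
      rw [h1, show pvGetI (a :: t) (k + 1) = pvGetI t k from by simp [pvGetI],
        pvGetI_eq_getElem (by omega), List.getLast_eq_getElem]
      simp [hk]
    have hr0len : ((a :: t).dropLast.set 0 (pvGetI (a :: t) ((a :: t).length - 1))).length
        = (a :: t).length - 1 := by simp
    have hkeep : ∀ i, 1 ≤ i →
        i < ((a :: t).dropLast.set 0 (pvGetI (a :: t) ((a :: t).length - 1))).length →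
        pvGetI ((a :: t).dropLast.set 0 (pvGetI (a :: t) ((a :: t).length - 1))) i
          = pvGetI (a :: t) i := by
      intro i hi1 hi
      rw [hr0len] at hi
      rw [pvGetI_set_ne _ (by omega : (0 : Nat) ≠ i), pvGetI_dropLast (by simpa using hi)]
    obtain ⟨s1, s2, s3⟩ := su_spec
      ((a :: t).dropLast.set 0 (pvGetI (a :: t) ((a :: t).length - 1))) 0
      (by rw [hr0len]; simpa using List.length_pos_iff.mpr ht)
      (by
        intro j hj hj1 hjp
        rw [hkeep j hj1 hj, hkeep ((j - 1) / 2) (by omega) (by omega)]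
        rw [hr0len] at hj
        exact hl j (by simp at hj ⊢; omega) hj1 (by omega))
    rw [heq]
    refine ⟨by rw [s1, hr0len], ?_, ?_, ?_⟩
    · refine (s2.cons a).trans ?_
      have hr0 : (a :: t).dropLast.set 0 (pvGetI (a :: t) ((a :: t).length - 1))
          = t.getLast ht :: t.dropLast := by
        rw [hlast, hrest, List.set_cons_zero]
      rw [hr0]
      refine ((List.perm_append_singleton (t.getLast ht) t.dropLast).symm.cons a).trans ?_
      rw [List.dropLast_concat_getLast ht]
    · intro j hj hj1 hjs
      exact s3 j (by rwa [s1] at hj) hj1 hjs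
    · intro y hy
      have := root_min_mem (a :: t) hl y hy
      simpa [pvGetI] using this

-- heapq.heappush keeps the heap property and adds the item
lemma push_spec (l : List Int) (x : Int) (hl : IsHeap l) :
    (pvHeappush l x).length = l.length + 1 ∧ (pvHeappush l x).Perm (x :: l) ∧
    IsHeap (pvHeappush l x) := by
  have heq : pvHeappush l x = pvSiftdown (l ++ [x]) 0 l.length := by
    simp [pvHeappush]
  obtain ⟨d1, d2, d3⟩ := sd_spec (l ++ [x]) 0 l.length (by simp) (pvDesc_zero _)
    (by
      intro j hj hj1 _ hjn
      have hj' : j < l.length := by simp at hj; omega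
      rw [pvGetI_append_left [x] hj', pvGetI_append_left [x] (by omega)]
      exact hl j hj' hj1 (by omega))
    (by
      intro _ j hj hjpar
      simp at hj; omega)
  rw [heq]
  refine ⟨by rw [d1]; simp, d2.trans (List.perm_append_singleton x l), ?_⟩
  intro j hj hj1 hjs
  exact d3 j (by rw [d1] at hj; exact hj) hj1 hjs

lemma neg_inj' : Function.Injective (fun x : Int => x * (-1)) := by
  intro a b hab
  simp only [] at hab
  omega

-- both loops perform the same combine-the-two-largest round on related states
lemma loops_eq : ∀ (fuel : Nat) (h lst : List Int) (total : Int),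
    IsHeap h → h.Perm (lst.map (fun x => x * (-1))) →
    pvLoopA fuel h total = pvLoopB fuel lst total := by
  intro fuel
  induction fuel with
  | zero => intro h lst total _ _; rfl
  | succ fuel ih =>
    intro h lst total hheap hperm
    have hlen : h.length = lst.length := by simpa using hperm.length_eq
    simp only [pvLoopA, pvLoopB]
    by_cases hgt : 1 < h.length
    · rw [if_pos hgt, if_pos (by omega : 1 < lst.length)]
      have hlstne : lst ≠ [] := by
        intro h0; subst h0; rw [List.length_nil] at hlen; omega
      obtain ⟨m1, hm1⟩ : ∃ m, PySem.List.max? lst (fun y => y) = some m := by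
        cases hx : PySem.List.max? lst (fun y => y)
        · rw [PySem.List.max?_eq_none_iff] at hx; exact absurd hx hlstne
        · exact ⟨_, rfl⟩
      have hm1mem : m1 ∈ lst := PySem.List.max?_mem hm1
      have hrem1 := PySem.List.remove?_eq_some_erase lst m1 hm1mem
      obtain ⟨p1len, p1perm, p1heap, p1min⟩ := pop_spec h hheap
        (by intro h0; rw [h0] at hgt; simp at hgt)
      have ha : (pvHeappop h).1 = m1 * (-1) := by
        have hmem_a : (pvHeappop h).1 ∈ h := p1perm.subset (List.mem_cons_self)
        obtain ⟨x0, hx0mem, hx0⟩ := List.mem_map.mp (hperm.subset hmem_a)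
        have hx0' : x0 * (-1) = (pvHeappop h).1 := hx0
        have hub : (pvHeappop h).1 ≤ m1 * (-1) :=
          p1min _ ((hperm.mem_iff).mpr (List.mem_map_of_mem hm1mem))
        have hx0le : x0 ≤ m1 := by simpa using PySem.List.max?_isMax hm1 x0 hx0mem
        omega
      have hconsperm := p1perm.trans hperm
      rw [ha] at hconsperm
      have h1perm0 := (List.cons_perm_iff_perm_erase.mp hconsperm).2
      have hmap1 : (lst.erase m1).map (fun x => x * (-1))
          = (lst.map (fun x => x * (-1))).erase (m1 * (-1)) := by
        simpa using List.map_erase neg_inj' lst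
      have h1perm : (pvHeappop h).2.Perm ((lst.erase m1).map (fun x => x * (-1))) := by
        rw [hmap1]; exact h1perm0
      -- second round
      have hl1len : (lst.erase m1).length = lst.length - 1 := List.length_erase_of_mem hm1mem
      have hl1ne : lst.erase m1 ≠ [] := by
        intro h0; rw [h0] at hl1len; simp at hl1len; omega
      obtain ⟨m2, hm2⟩ : ∃ m, PySem.List.max? (lst.erase m1) (fun y => y) = some m := by
        cases hx : PySem.List.max? (lst.erase m1) (fun y => y)
        · rw [PySem.List.max?_eq_none_iff] at hx; exact absurd hx hl1ne
        · exact ⟨_, rfl⟩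
      have hm2mem : m2 ∈ lst.erase m1 := PySem.List.max?_mem hm2
      have hrem2 := PySem.List.remove?_eq_some_erase (lst.erase m1) m2 hm2mem
      obtain ⟨p2len, p2perm, p2heap, p2min⟩ := pop_spec (pvHeappop h).2 p1heap
        (by intro h0; rw [h0] at p1len; simp at p1len; omega)
      have hb : (pvHeappop (pvHeappop h).2).1 = m2 * (-1) := by
        have hmem_b : (pvHeappop (pvHeappop h).2).1 ∈ (pvHeappop h).2 :=
          p2perm.subset (List.mem_cons_self)
        obtain ⟨x0, hx0mem, hx0⟩ := List.mem_map.mp (h1perm.subset hmem_b)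
        have hx0' : x0 * (-1) = (pvHeappop (pvHeappop h).2).1 := hx0
        have hub : (pvHeappop (pvHeappop h).2).1 ≤ m2 * (-1) :=
          p2min _ ((h1perm.mem_iff).mpr (List.mem_map_of_mem hm2mem))
        have hx0le : x0 ≤ m2 := by simpa using PySem.List.max?_isMax hm2 x0 hx0mem
        omega
      have hconsperm2 := p2perm.trans h1perm
      rw [hb] at hconsperm2
      have h2perm0 := (List.cons_perm_iff_perm_erase.mp hconsperm2).2
      have hmap2 : ((lst.erase m1).erase m2).map (fun x => x * (-1))
          = ((lst.erase m1).map (fun x => x * (-1))).erase (m2 * (-1)) := by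
        simpa using List.map_erase neg_inj' (lst.erase m1)
      have h2perm : (pvHeappop (pvHeappop h).2).2.Perm
          (((lst.erase m1).erase m2).map (fun x => x * (-1))) := by
        rw [hmap2]; exact h2perm0
      obtain ⟨q1, q2, q3⟩ := push_spec (pvHeappop (pvHeappop h).2).2
        ((pvHeappop h).1 + (pvHeappop (pvHeappop h).2).1) p2heap
      rw [hm1]; simp only [Option.getD_some]
      rw [hrem1]; simp only [Option.getD_some]
      rw [hm2]; simp only [Option.getD_some]
      rw [hrem2]; simp only [Option.getD_some]
      have hsum : (pvHeappop h).1 + (pvHeappop (pvHeappop h).2).1 = (m1 + m2) * (-1) := by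
        rw [ha, hb]; ring
      have hpushperm : (pvHeappush (pvHeappop (pvHeappop h).2).2
            ((pvHeappop h).1 + (pvHeappop (pvHeappop h).2).1)).Perm
          (((lst.erase m1).erase m2 ++ [m1 + m2]).map (fun x => x * (-1))) := by
        refine q2.trans ?_
        have hmapapp : ((lst.erase m1).erase m2 ++ [m1 + m2]).map (fun x => x * (-1))
            = ((lst.erase m1).erase m2).map (fun x => x * (-1)) ++ [(m1 + m2) * (-1)] := by
          simp
        rw [hmapapp, ← hsum]
        exact (h2perm.cons _).trans (List.perm_append_singleton _ _).symm
      have htot : total + ((pvHeappop h).1 + (pvHeappop (pvHeappop h).2).1) * (-1)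
          = total + (m1 + m2) := by rw [hsum]; ring
      rw [htot]
      exact ih _ _ _ q3 hpushperm
    · rw [if_neg hgt, if_neg (by omega : ¬ 1 < lst.length)]

-- ===== VERDICT (by name: the statement is the Claim_ definition above) =====
theorem get_total_time2_spec : Claim_equal_get_total_time2 := by
  intro arr _
  show get_total_time2 arr = get_total_time2_alt arr
  obtain ⟨e1, e2, e3⟩ := heapify_spec (arr.map (fun el => el * (-1)))
  simp only [get_total_time2, get_total_time2_alt]
  exact loops_eq arr.length _ arr 0 e3 e2
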